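-- pv_equiv track=rewrite | github.com/sunnytulakorn/Coding-by-Python | DataSci/Lab07_5_630510582.py | replace_sorting
-- ===== SOURCE A (Python) =====
-- def replace_sorting(list_input, item):
--     list_x = []
--     list_0 = []
--     for i in list_input:
--         if i != item:
--             list_x.append(i)
--         else:
--             list_0.append(0)
--
--     ans = list_0 + list_x
--     ans.sort()
--     return ans
-- ===== SOURCE B (Python) =====
-- def replace_sorting(list_input, item):
--     # Sort only the non-matching elements, then splice the zeros (one per match)
--     # into their correct position (right after the negatives).
--     others = sorted(x for x in list_input if x != item)
--     count = len(list_input) - len(others)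
--     neg = sum(1 for x in others if x < 0)
--     return others[:neg] + [0] * count + others[neg:]
-- ===== Notes on version B (the rewrite author's own statement) =====
-- stated objective: alternative
-- what changed: Instead of rewriting matches to 0 and sorting the whole combined list, B sorts only the non-matching elements and splices the block of zeros in after the negatives.
import Mathlib
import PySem

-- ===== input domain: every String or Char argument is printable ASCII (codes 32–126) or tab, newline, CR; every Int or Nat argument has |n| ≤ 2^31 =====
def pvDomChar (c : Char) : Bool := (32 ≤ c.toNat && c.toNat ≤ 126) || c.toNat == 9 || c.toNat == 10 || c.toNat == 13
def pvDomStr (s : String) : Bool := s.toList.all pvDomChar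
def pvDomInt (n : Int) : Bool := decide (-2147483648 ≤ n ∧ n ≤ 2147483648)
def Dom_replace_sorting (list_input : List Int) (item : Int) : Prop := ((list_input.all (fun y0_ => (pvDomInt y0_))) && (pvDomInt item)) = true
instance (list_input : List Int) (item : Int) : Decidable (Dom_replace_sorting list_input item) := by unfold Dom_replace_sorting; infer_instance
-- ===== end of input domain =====

-- B sorts only the non-matching elements and splices the zeros in after the negatives,
-- instead of rewriting matches to 0 and sorting the whole combined list (same result).

-- ===== PORT A =====
-- loop: builds list_x (non-matching) and list_0 (a 0 per match), then sorts list_0 ++ list_x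
def replace_sorting (list_input : List Int) (item : Int) : List Int :=
  let p := list_input.foldl
    (fun (acc : List Int × List Int) i =>
      if i ≠ item then (acc.1 ++ [i], acc.2) else (acc.1, acc.2 ++ [0]))
    ([], [])
  PySem.List.sorted (p.2 ++ p.1) (fun x => x) false

-- ===== PORT B =====
-- others[:neg] / others[neg:] are exact as take/drop since 0 ≤ neg ≤ others.length;
-- sum(1 for x in others if x < 0) is the length of the filtered list.
def replace_sorting_alt (list_input : List Int) (item : Int) : List Int :=
  let others := PySem.List.sorted (list_input.filter (fun x => decide (x ≠ item))) (fun x => x) false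
  let count := list_input.length - others.length
  let neg := (others.filter (fun x => decide (x < 0))).length
  others.take neg ++ List.replicate count 0 ++ others.drop neg

-- ===== PRECONDITION & SPEC =====
def Spec_replace_sorting (list_input : List Int) (item : Int) (out : List Int) : Prop := out = replace_sorting_alt list_input item
instance (list_input : List Int) (item : Int) (out : List Int) : Decidable (Spec_replace_sorting list_input item out) := by unfold Spec_replace_sorting; infer_instance

-- ===== CLAIM (what is proved, stated in full; the proofs are below) =====
def Claim_equal_replace_sorting : Prop := ∀ (list_input : List Int) (item : Int), Dom_replace_sorting list_input item → Spec_replace_sorting list_input item (replace_sorting list_input item)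

-- ===== LEMMAS AND PROOFS =====

-- A's loop computes the filter of non-matching elements and one 0 per match.
theorem foldl_char (item : Int) (l : List Int) (acc : List Int × List Int) :
    l.foldl (fun (acc : List Int × List Int) i =>
      if i ≠ item then (acc.1 ++ [i], acc.2) else (acc.1, acc.2 ++ [0])) acc
    = (acc.1 ++ l.filter (fun x => decide (x ≠ item)),
       acc.2 ++ List.replicate (l.countP (fun x => decide (x = item))) 0) := by
  induction l generalizing acc with
  | nil => simp
  | cons a t ih =>
    rw [List.foldl_cons, ih]
    by_cases h : a = item
    · simp [h, List.replicate_succ]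
    · simp [h, List.append_assoc]

theorem countP_split (l : List Int) (item : Int) :
    l.countP (fun x => decide (x ≠ item)) + l.countP (fun x => decide (x = item)) = l.length := by
  induction l with
  | nil => simp
  | cons a t ih => by_cases h : a = item <;> simp [h] at ih ⊢ <;> omega

-- a ≤-sorted list of ints splits as its negatives followed by its non-negatives
theorem sorted_split (s : List Int) (h : s.Pairwise (· ≤ ·)) :
    s = s.filter (fun x => decide (x < 0)) ++ s.filter (fun x => !decide (x < 0)) := by
  induction s with
  | nil => simp
  | cons a t ih =>
    rcases List.pairwise_cons.mp h with ⟨ha, ht⟩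
    by_cases hn : a < 0
    · simpa [List.filter_cons, hn] using ih ht
    · have hzero : t.filter (fun x => decide (x < 0)) = [] := by
        rw [List.filter_eq_nil_iff]
        intro x hx
        have := ha x hx
        simp; omega
      have h2 := ih ht
      rw [hzero] at h2
      simp only [List.filter_cons, hzero]
      simp only [List.nil_append] at h2
      simp [hn, ← h2]

theorem main_eq (list_input : List Int) (item : Int) :
    replace_sorting list_input item = replace_sorting_alt list_input item := by
  unfold replace_sorting replace_sorting_alt
  rw [foldl_char]
  simp only [List.nil_append]
  set f := list_input.filter (fun x => decide (x ≠ item)) with hf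
  set s := PySem.List.sorted f (fun x => x) false with hs
  set A := s.filter (fun x => decide (x < 0)) with hA
  set B := s.filter (fun x => !decide (x < 0)) with hB
  have hsp : s.Pairwise (· ≤ ·) := PySem.List.sorted_pairwise f (fun x => x)
  have hsplit : s = A ++ B := sorted_split s hsp
  have hlenS : s.length = f.length := by rw [hs]; exact PySem.List.length_sorted f _ _
  have hcount : list_input.length - s.length = list_input.countP (fun x => decide (x = item)) := by
    rw [hlenS, hf]
    rw [← List.countP_eq_length_filter]
    have := countP_split list_input item
    omega
  set k := list_input.countP (fun x => decide (x = item)) with hk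
  rw [hcount]
  have htake : s.take A.length = A := by rw [hsplit]; exact List.take_left
  have hdrop : s.drop A.length = B := by rw [hsplit]; exact List.drop_left
  rw [htake, hdrop]
  -- now: sorted (replicate k 0 ++ f) = (A ++ replicate k 0) ++ B
  have hmemA : ∀ x ∈ A, x < 0 := by
    intro x hx; rw [hA] at hx; have := List.of_mem_filter hx; simpa using this
  have hmemB : ∀ x ∈ B, 0 ≤ x := by
    intro x hx; rw [hB] at hx; have := List.of_mem_filter hx; simp at this; omega
  have hpA : A.Pairwise (· ≤ ·) := List.Pairwise.sublist List.filter_sublist hsp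
  have hpB : B.Pairwise (· ≤ ·) := List.Pairwise.sublist List.filter_sublist hsp
  apply PySem.List.sorted_id_eq_of_perm_of_pairwise
  · -- permutation
    refine ((List.perm_append_comm.append_right B).trans ?_)
    rw [List.append_assoc]
    apply List.Perm.append_left
    rw [← hsplit]
    exact PySem.List.sorted_perm f (fun x => x) false
  · -- pairwise ≤
    rw [List.pairwise_append]
    refine ⟨?_, hpB, ?_⟩
    · rw [List.pairwise_append]
      refine ⟨hpA, List.pairwise_replicate.mpr (Or.inr le_rfl), ?_⟩
      intro a ha b hb
      have h1 := hmemA a ha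
      have h2 := List.eq_of_mem_replicate hb
      omega
    · intro a ha b hb
      have h2 := hmemB b hb
      rcases List.mem_append.mp ha with h | h
      · have := hmemA a h; omega
      · have := List.eq_of_mem_replicate h; omega

-- ===== VERDICT (by name: the statement is the Claim_ definition above) =====
theorem replace_sorting_spec : Claim_equal_replace_sorting := by
  intro l i _
  exact main_eq l i
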